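-- pv_equiv track=rewrite | github.com/NineAbyss/GLBench | models/predictor/GraphText/src/graph_text/model.py | find_consecutive_subarrays
-- ===== SOURCE A (Python) =====
-- def find_consecutive_subarrays(arr):
--     if not arr:
--         return []
--
--     subarrays = []
--     current_subarray = [arr[0]]
--
--     for i in range(1, len(arr)):
--         if arr[i] == arr[i - 1] + 1:
--             current_subarray.append(arr[i])
--         else:
--             subarrays.append(current_subarray)
--             current_subarray = [arr[i]]
--
--     subarrays.append(current_subarray)
--     return subarrays
-- ===== SOURCE B (Python) =====
-- from itertools import groupby
--
--
-- def find_consecutive_subarrays(arr):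
--     # A run that increases by one has constant index-minus-value key.
--     return [[v for _, v in g]
--             for _, g in groupby(enumerate(arr), key=lambda iv: iv[0] - iv[1])]
-- ===== Notes on version B (the rewrite author's own statement) =====
-- stated objective: idiomatic
-- what changed: Replaces the index loop comparing each element with its predecessor (plus a mutable current-subarray accumulator) by itertools.groupby over enumerate with the index-minus-value key, which is constant exactly on a consecutive run.
import Mathlib
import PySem

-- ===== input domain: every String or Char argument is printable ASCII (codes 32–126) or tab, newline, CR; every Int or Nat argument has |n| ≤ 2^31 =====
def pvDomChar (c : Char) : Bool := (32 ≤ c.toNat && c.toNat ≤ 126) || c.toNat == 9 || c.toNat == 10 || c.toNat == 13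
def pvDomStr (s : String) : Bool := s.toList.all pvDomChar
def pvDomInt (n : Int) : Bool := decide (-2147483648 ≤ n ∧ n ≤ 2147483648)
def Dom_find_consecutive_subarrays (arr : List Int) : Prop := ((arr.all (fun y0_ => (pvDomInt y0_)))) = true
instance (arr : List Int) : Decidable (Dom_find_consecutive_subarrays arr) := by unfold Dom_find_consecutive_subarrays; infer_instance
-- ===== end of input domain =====

-- B: itertools.groupby over enumerate with the index-minus-value key instead of A's
-- index loop comparing each element with its predecessor (idiomatic decomposition).


-- ===== PORT A =====
def find_consecutive_subarrays (arr : List Int) : List (List Int) :=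
  if arr = [] then []
  else
    let st :=
      (PySem.List.pyRange 1 (arr.length : Int) 1).foldl
        (fun (st : List (List Int) × List Int) i =>
          if PySem.List.pyGetD arr i 0 = PySem.List.pyGetD arr (i - 1) 0 + 1 then
            (st.1, st.2 ++ [PySem.List.pyGetD arr i 0])
          else
            (st.1 ++ [st.2], [PySem.List.pyGetD arr i 0]))
        ([], [PySem.List.pyGetD arr 0 0])
    st.1 ++ [st.2]

-- ===== PORT B =====
-- groupby over enumerate(arr) with key i - v; each group's values are collected in order.
def pvGroupByKey (k : Int) (cur : List Int) : List (Int × Int) → List (List Int)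
  | [] => [cur]
  | (i, v) :: rest =>
      if i - v = k then pvGroupByKey k (cur ++ [v]) rest
      else cur :: pvGroupByKey (i - v) [v] rest

def find_consecutive_subarrays_alt (arr : List Int) : List (List Int) :=
  match PySem.List.enumerate arr 0 with
  | [] => []
  | (i, v) :: rest => pvGroupByKey (i - v) [v] rest

-- ===== PRECONDITION & SPEC =====
def Spec_find_consecutive_subarrays (arr : List Int) (out : List (List Int)) : Prop := out = find_consecutive_subarrays_alt arr
instance (arr : List Int) (out : List (List Int)) : Decidable (Spec_find_consecutive_subarrays arr out) := by unfold Spec_find_consecutive_subarrays; infer_instance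

-- ===== CLAIM (what is proved, stated in full; the proofs are below) =====
def Claim_equal_find_consecutive_subarrays : Prop := ∀ (arr : List Int), Dom_find_consecutive_subarrays arr → Spec_find_consecutive_subarrays arr (find_consecutive_subarrays arr)

-- ===== LEMMAS AND PROOFS =====

-- A's loop body, applied to the pair (previous element, current element).
def pvStep (st : List (List Int) × List Int) (p : Int × Int) : List (List Int) × List Int :=
  if p.2 = p.1 + 1 then (st.1, st.2 ++ [p.2]) else (st.1 ++ [st.2], [p.2])

-- The indices 1..len map, through A's two array accesses, to the adjacent-pairs list.
theorem pv_pairs (arr : List Int) (d : Int) :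
    (PySem.List.pyRange 1 (arr.length : Int) 1).map
      (fun i => (PySem.List.pyGetD arr (i - 1) d, PySem.List.pyGetD arr i d))
      = arr.zip (arr.drop 1) := by
  rw [PySem.List.pyRange_one, List.map_map]
  apply List.ext_getElem
  · simp only [List.length_map, List.length_range, List.length_zip, List.length_drop]
    omega
  · intro k h1 h2
    have hk1 : k + 1 < arr.length := by
      simp only [List.length_map, List.length_range] at h1
      omega
    have hk0 : k < arr.length := Nat.lt_of_succ_lt hk1
    have e1 : PySem.List.pyGetD arr ((1 : Int) + (k : Int) - 1) d = arr[k] := by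
      have h : (1 : Int) + (k : Int) - 1 = ((k : Nat) : Int) := by omega
      rw [h, PySem.List.pyGetD_natCast, List.getD_eq_getElem _ _ hk0]
    have e2 : PySem.List.pyGetD arr ((1 : Int) + (k : Int)) d = arr[k + 1] := by
      have h : (1 : Int) + (k : Int) = (((k + 1 : Nat)) : Int) := by push_cast; omega
      rw [h, PySem.List.pyGetD_natCast, List.getD_eq_getElem _ _ hk1]
    have e3 : arr[k]?.getD d = arr[k] := by rw [List.getElem?_eq_getElem hk0]; rfl
    have e4 : arr[k + 1]?.getD d = arr[k + 1] := by rw [List.getElem?_eq_getElem hk1]; rfl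
    simp [List.getElem_zip, e2, e3]

-- Folding A's step over adjacent pairs agrees with B's groupby recursion,
-- for any start index s of the enumeration (the previous element sits at index s - 1).
theorem pv_fold_eq_groupby (l : List Int) :
    ∀ (prev : Int) (subs : List (List Int)) (cur : List Int) (s : Int),
      (((prev :: l).zip l).foldl pvStep (subs, cur)).1
        ++ [(((prev :: l).zip l).foldl pvStep (subs, cur)).2]
      = subs ++ pvGroupByKey (s - 1 - prev) cur (PySem.List.enumerate l s) := by
  induction l with
  | nil => intro prev subs cur s; simp [pvGroupByKey, PySem.List.enumerate]
  | cons x r ih =>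
      intro prev subs cur s
      rw [PySem.List.enumerate_cons, List.zip_cons_cons, List.foldl_cons]
      by_cases hx : x = prev + 1
      · rw [show pvStep (subs, cur) (prev, x) = (subs, cur ++ [x]) by
          simp [pvStep, hx]]
        rw [show pvGroupByKey (s - 1 - prev) cur ((s, x) :: PySem.List.enumerate r (s + 1))
              = pvGroupByKey (s - 1 - prev) (cur ++ [x]) (PySem.List.enumerate r (s + 1)) by
          simp [pvGroupByKey, show s - x = s - 1 - prev by omega]]
        have := ih x subs (cur ++ [x]) (s + 1)
        rw [show s + 1 - 1 - x = s - 1 - prev by omega] at this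
        exact this
      · rw [show pvStep (subs, cur) (prev, x) = (subs ++ [cur], [x]) by
          simp [pvStep, hx]]
        rw [show pvGroupByKey (s - 1 - prev) cur ((s, x) :: PySem.List.enumerate r (s + 1))
              = cur :: pvGroupByKey (s - x) [x] (PySem.List.enumerate r (s + 1)) by
          simp [pvGroupByKey, show ¬ (s - x = s - 1 - prev) by omega]]
        have := ih x (subs ++ [cur]) [x] (s + 1)
        rw [show s + 1 - 1 - x = s - x by omega] at this
        rw [this]
        simp

theorem pv_main (arr : List Int) :
    find_consecutive_subarrays arr = find_consecutive_subarrays_alt arr := by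
  cases arr with
  | nil => rfl
  | cons a l =>
      have hfold : ∀ init : List (List Int) × List Int,
          (PySem.List.pyRange 1 (((a :: l) : List Int).length : Int) 1).foldl
            (fun (st : List (List Int) × List Int) i =>
              if PySem.List.pyGetD (a :: l) i 0 = PySem.List.pyGetD (a :: l) (i - 1) 0 + 1 then
                (st.1, st.2 ++ [PySem.List.pyGetD (a :: l) i 0])
              else
                (st.1 ++ [st.2], [PySem.List.pyGetD (a :: l) i 0]))
            init
          = ((a :: l).zip l).foldl pvStep init := by
        intro init
        have hp := pv_pairs (a :: l) 0
        rw [show (a :: l).drop 1 = l from rfl] at hp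
        rw [← hp, List.foldl_map]
        rfl
      unfold find_consecutive_subarrays find_consecutive_subarrays_alt
      rw [if_neg (by simp), PySem.List.enumerate_cons, hfold, PySem.List.pyGetD_zero_cons]
      show (((a :: l).zip l).foldl pvStep ([], [a])).1
            ++ [(((a :: l).zip l).foldl pvStep ([], [a])).2]
          = pvGroupByKey (0 - a) [a] (PySem.List.enumerate l 1)
      have := pv_fold_eq_groupby l a [] [a] 1
      rw [show (1 : Int) - 1 - a = 0 - a by omega] at this
      simpa using this

-- ===== VERDICT (by name: the statement is the Claim_ definition above) =====
theorem find_consecutive_subarrays_spec : Claim_equal_find_consecutive_subarrays := by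
  intro arr _
  exact pv_main arr
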